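-- pv_equiv track=rewrite | github.com/fahd-dotcom/app.py | app.py | clean_paragraphs
-- ===== SOURCE A (Python) =====
-- def clean_paragraphs(original_text: str) -> str:
--     if not original_text:
--         return ""
--     lines = original_text.split("\n")
--     lines = [line.rstrip() for line in lines]
--     paragraphs, current = [], []
--     for line in lines:
--         if line.strip() == "":
--             if current:
--                 paragraphs.append("\n".join(current))
--                 current = []
--         else:
--             current.append(line)
--     if current:
--         paragraphs.append("\n".join(current))
--     return "\n\n".join(paragraphs)
-- ===== SOURCE B (Python) =====
-- def clean_paragraphs(original_text: str) -> str:
--     # Single pass that builds the output pieces directly with a pending-separator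
--     # state machine, instead of accumulating per-paragraph line lists and flushing.
--     if not original_text:
--         return ""
--     out = []
--     sep = ""
--     for raw in original_text.split("\n"):
--         line = raw.rstrip()
--         if line:
--             out.append(sep + line)
--             sep = "\n"
--         elif out:
--             sep = "\n\n"
--     return "".join(out)
-- ===== Notes on version B (the rewrite author's own statement) =====
-- stated objective: simpler
-- what changed: Replaces the paragraph-list accumulator with the post-loop flush by a single pass that emits output pieces directly, tracking only the pending separator ("" / "\n" / "\n\n") between lines.
import Mathlib
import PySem

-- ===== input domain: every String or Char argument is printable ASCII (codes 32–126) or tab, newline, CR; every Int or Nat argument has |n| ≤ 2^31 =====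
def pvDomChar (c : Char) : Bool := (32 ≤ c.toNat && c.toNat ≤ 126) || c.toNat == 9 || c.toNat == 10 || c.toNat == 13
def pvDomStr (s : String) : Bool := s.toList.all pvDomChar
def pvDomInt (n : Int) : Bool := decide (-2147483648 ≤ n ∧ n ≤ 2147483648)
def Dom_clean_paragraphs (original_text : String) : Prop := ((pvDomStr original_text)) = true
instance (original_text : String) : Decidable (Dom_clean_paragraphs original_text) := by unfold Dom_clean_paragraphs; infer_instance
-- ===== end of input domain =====

-- B replaces A's paragraph-list accumulator and post-loop flush by a single pass that
-- emits output pieces directly, tracking only the pending separator between lines (simpler).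

-- ===== PORT A =====
-- str.split("\n") with a nonempty separator never fails; PySem.Str.split? returns some, .getD [] is exact here.
def clean_paragraphs (original_text : String) : String :=
  if original_text = "" then ""
  else
    let lines := (PySem.Str.split? original_text "\n").getD []
    let lines := lines.map (fun line => PySem.Str.rstrip line)
    let p := lines.foldl
      (fun (st : List String × List String) line =>
        if PySem.Str.strip line = "" then
          (if st.2 ≠ [] then (st.1 ++ [PySem.Str.join "\n" st.2], ([] : List String)) else st)
        else (st.1, st.2 ++ [line]))
      ([], [])
    let paragraphs := if p.2 ≠ [] then p.1 ++ [PySem.Str.join "\n" p.2] else p.1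
    PySem.Str.join "\n\n" paragraphs

-- ===== PORT B =====
def clean_paragraphs_alt (original_text : String) : String :=
  if original_text = "" then ""
  else
    let q := ((PySem.Str.split? original_text "\n").getD []).foldl
      (fun (st : List String × String) raw =>
        let line := PySem.Str.rstrip raw
        if line ≠ "" then (st.1 ++ [st.2 ++ line], "\n")
        else if st.1 ≠ [] then (st.1, "\n\n") else st)
      ([], "")
    PySem.Str.join "" q.1

-- ===== PRECONDITION & SPEC =====
def Spec_clean_paragraphs (original_text : String) (out : String) : Prop := out = clean_paragraphs_alt original_text
instance (original_text : String) (out : String) : Decidable (Spec_clean_paragraphs original_text out) := by unfold Spec_clean_paragraphs; infer_instance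

-- ===== CLAIM (what is proved, stated in full; the proofs are below) =====
def Claim_equal_clean_paragraphs : Prop := ∀ (original_text : String), Dom_clean_paragraphs original_text → Spec_clean_paragraphs original_text (clean_paragraphs original_text)

-- ===== LEMMAS AND PROOFS =====

-- Chars-level images of the two loop bodies (raw line as List Char)
def cpStepA (st : List (List Char) × List (List Char)) (raw : List Char) :
    List (List Char) × List (List Char) :=
  let line := PySem.Chars.rstrip raw
  if PySem.Chars.strip line = [] then
    (if st.2 ≠ [] then (st.1 ++ [PySem.Chars.join ['\n'] st.2], ([] : List (List Char))) else st)
  else (st.1, st.2 ++ [line])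

def cpStepB (st : List (List Char) × List Char) (raw : List Char) :
    List (List Char) × List Char :=
  let line := PySem.Chars.rstrip raw
  if line ≠ [] then (st.1 ++ [st.2 ++ line], ['\n'])
  else if st.1 ≠ [] then (st.1, ['\n', '\n']) else st

-- loop invariant relating A's (paragraphs, current) to B's (out, sep)
def cpR (a : List (List Char) × List (List Char)) (b : List (List Char) × List Char) : Prop :=
  b.1.flatten =
      PySem.Chars.join ['\n', '\n'] a.1 ++
        (if a.2 = [] then [] else
          (if a.1 = [] then [] else ['\n', '\n']) ++ PySem.Chars.join ['\n'] a.2)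
  ∧ b.2 = (if a.2 = [] then (if a.1 = [] then [] else ['\n', '\n']) else ['\n'])
  ∧ (b.1 = [] ↔ (a.1 = [] ∧ a.2 = []))

lemma cpStrip_nil_imp {cs : List Char} (h : PySem.Chars.strip cs = []) :
    ∀ c ∈ cs, PySem.Chars.isspace c = true := by
  intro c hc
  simp only [PySem.Chars.strip, PySem.Chars.rstrip, PySem.Chars.lstrip] at h
  rw [List.reverse_eq_nil_iff, List.dropWhile_eq_nil_iff] at h
  have : c ∈ List.takeWhile PySem.Chars.isspace cs ∨ c ∈ List.dropWhile PySem.Chars.isspace cs := by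
    rw [← List.mem_append, List.takeWhile_append_dropWhile]; exact hc
  rcases this with h1 | h1
  · exact List.mem_takeWhile_imp h1
  · exact h c (List.mem_reverse.mpr h1)

lemma cpStrip_rstrip_nil_iff (cs : List Char) :
    PySem.Chars.strip (PySem.Chars.rstrip cs) = [] ↔ PySem.Chars.rstrip cs = [] := by
  constructor
  · intro h
    by_contra hne
    have hall := cpStrip_nil_imp h
    set r := PySem.Chars.rstrip cs with hr
    have hrne : r.reverse ≠ [] := by simpa using hne
    obtain ⟨c, t, hct⟩ := List.exists_cons_of_ne_nil hrne
    have hcr : c ∈ r := List.mem_reverse.mp (hct ▸ List.mem_cons_self ..)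
    have hnsp : ¬ PySem.Chars.isspace c = true := by
      have hdw : r.reverse = List.dropWhile PySem.Chars.isspace cs.reverse := by
        simp [hr, PySem.Chars.rstrip]
      rw [hdw] at hct
      have := List.head_dropWhile_not (p := PySem.Chars.isspace) (l := cs.reverse)
        (by rw [hct]; simp)
      simpa [hct] using this
    exact hnsp (hall c hcr)
  · intro h; rw [h]; rfl

lemma cpJoin_append_singleton (sep : List Char) (ps : List (List Char)) (x : List Char) :
    PySem.Chars.join sep (ps ++ [x]) =
      PySem.Chars.join sep ps ++ (if ps = [] then [] else sep) ++ x := by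
  induction ps with
  | nil => simp [PySem.Chars.join_singleton, PySem.Chars.join_nil]
  | cons p ps ih =>
    cases ps with
    | nil => simp [PySem.Chars.join_cons_cons, PySem.Chars.join_singleton]
    | cons q rest =>
      simp only [List.cons_append, PySem.Chars.join_cons_cons] at *
      simp [ih]

lemma cpJoin_nil_eq_flatten (ps : List (List Char)) :
    PySem.Chars.join [] ps = ps.flatten := by
  induction ps with
  | nil => rfl
  | cons p ps ih =>
    cases ps with
    | nil => simp [PySem.Chars.join_singleton]
    | cons q rest => simp [PySem.Chars.join_cons_cons] at *; simp [ih]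

lemma cpStep_preserves (a : List (List Char) × List (List Char))
    (b : List (List Char) × List Char) (raw : List Char) (h : cpR a b) :
    cpR (cpStepA a raw) (cpStepB b raw) := by
  obtain ⟨pa, cur⟩ := a
  obtain ⟨out, sep⟩ := b
  obtain ⟨h1, h2, h3⟩ := h
  simp only [cpR] at h1 h2 h3 ⊢
  simp only [cpStepA, cpStepB]
  by_cases hb : PySem.Chars.rstrip raw = []
  · -- blank line
    rw [if_pos ((cpStrip_rstrip_nil_iff raw).mpr hb), if_neg (by simpa using hb)]
    by_cases hc : cur = []
    · subst hc
      simp only [ne_eq, not_true_eq_false, if_false]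
      by_cases ho : out = []
      · have hpa : pa = [] := (h3.mp ho).1
        simp [ho, hpa, h2, PySem.Chars.join_nil]
      · have hpa : pa ≠ [] := fun hp => ho (h3.mpr ⟨hp, rfl⟩)
        simp only [ho, not_false_eq_true, if_true]
        refine ⟨by simpa using h1, by simp [hpa], by simp [hpa]⟩
    · have ho : out ≠ [] := fun hoe => hc (h3.mp hoe).2
      simp only [ne_eq, hc, not_false_eq_true, if_true, ho]
      refine ⟨?_, by simp, by simp⟩
      rw [h1, if_neg hc, cpJoin_append_singleton]
      simp
  · -- non-blank line
    rw [if_neg (fun hs => hb ((cpStrip_rstrip_nil_iff raw).mp hs)),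
        if_pos (by simpa using hb)]
    refine ⟨?_, by simp, by simp⟩
    simp only [List.flatten_append, List.flatten_cons, List.flatten_nil, List.append_nil]
    rw [h1, h2, cpJoin_append_singleton]
    by_cases hc : cur = []
    · simp [hc]
    · simp [hc]

lemma cpFold_preserves (xs : List (List Char)) (a : List (List Char) × List (List Char))
    (b : List (List Char) × List Char) (h : cpR a b) :
    cpR (xs.foldl cpStepA a) (xs.foldl cpStepB b) := by
  induction xs generalizing a b with
  | nil => exact h
  | cons x xs ih => exact ih _ _ (cpStep_preserves a b x h)

-- maps a String-level loop state to its Chars-level image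
def cpF (st : List String × List String) : List (List Char) × List (List Char) :=
  (st.1.map String.toList, st.2.map String.toList)

def cpG (st : List String × String) : List (List Char) × List Char :=
  (st.1.map String.toList, st.2.toList)

lemma cpBridgeA (lines : List String) :
    cpF ((lines.map (fun line => PySem.Str.rstrip line)).foldl
      (fun (st : List String × List String) line =>
        if PySem.Str.strip line = "" then
          (if st.2 ≠ [] then (st.1 ++ [PySem.Str.join "\n" st.2], ([] : List String)) else st)
        else (st.1, st.2 ++ [line]))
      ([], [])) = (lines.map String.toList).foldl cpStepA ([], []) := by
  rw [List.foldl_map, List.foldl_map]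
  refine (List.foldl_hom cpF (fun st raw => ?_)).symm
  have hcond : (PySem.Chars.strip (PySem.Chars.rstrip raw.toList) = [])
      ↔ (PySem.Str.strip (PySem.Str.rstrip raw) = "") := by
    rw [← PySem.Str.toList_rstrip, ← PySem.Str.toList_strip]
    exact String.toList_eq_nil_iff
  simp only [cpStepA, cpF, hcond, ne_eq, List.map_eq_nil_iff]
  by_cases hs : PySem.Str.strip (PySem.Str.rstrip raw) = "" <;>
    by_cases hc : st.2 = [] <;>
      simp [hs, hc, PySem.Str.toList_join, List.map_append,
        show ("\n" : String).toList = ['\n'] from rfl]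

lemma cpBridgeB (lines : List String) :
    cpG (lines.foldl
      (fun (st : List String × String) raw =>
        let line := PySem.Str.rstrip raw
        if line ≠ "" then (st.1 ++ [st.2 ++ line], "\n")
        else if st.1 ≠ [] then (st.1, "\n\n") else st)
      ([], "")) = (lines.map String.toList).foldl cpStepB ([], []) := by
  rw [List.foldl_map]
  refine (List.foldl_hom cpG (fun st raw => ?_)).symm
  have hcond : (PySem.Chars.rstrip raw.toList = []) ↔ (PySem.Str.rstrip raw = "") := by
    rw [← PySem.Str.toList_rstrip]
    exact String.toList_eq_nil_iff
  simp only [cpStepB, cpG, hcond, ne_eq, List.map_eq_nil_iff]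
  by_cases hs : PySem.Str.rstrip raw = "" <;> by_cases ho : st.1 = [] <;>
    simp [hs, ho, String.toList_append, List.map_append,
      show ("\n" : String).toList = ['\n'] from rfl,
      show ("\n\n" : String).toList = ['\n', '\n'] from rfl]

-- ===== VERDICT (by name: the statement is the Claim_ definition above) =====
theorem clean_paragraphs_spec : Claim_equal_clean_paragraphs := by
  intro t _
  show clean_paragraphs t = clean_paragraphs_alt t
  by_cases ht : t = ""
  · simp [clean_paragraphs, clean_paragraphs_alt, ht]
  · apply String.ext
    simp only [clean_paragraphs, clean_paragraphs_alt, if_neg ht]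
    set lines := (PySem.Str.split? t "\n").getD [] with hlines
    have hR := cpFold_preserves (lines.map String.toList) ([], []) ([], [])
      (by simp [cpR, PySem.Chars.join_nil])
    rw [← cpBridgeA, ← cpBridgeB] at hR
    set P := (lines.map (fun line => PySem.Str.rstrip line)).foldl
      (fun (st : List String × List String) line =>
        if PySem.Str.strip line = "" then
          (if st.2 ≠ [] then (st.1 ++ [PySem.Str.join "\n" st.2], ([] : List String)) else st)
        else (st.1, st.2 ++ [line]))
      ([], []) with hP
    set Q := lines.foldl
      (fun (st : List String × String) raw =>
        let line := PySem.Str.rstrip raw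
        if line ≠ "" then (st.1 ++ [st.2 ++ line], "\n")
        else if st.1 ≠ [] then (st.1, "\n\n") else st)
      ([], "") with hQ
    obtain ⟨h1, -, -⟩ := hR
    simp only [cpF, cpG] at h1
    rw [PySem.Str.toList_join, PySem.Str.toList_join,
      show ("\n\n".toList) = ['\n', '\n'] from rfl,
      show ("".toList) = ([] : List Char) from rfl,
      cpJoin_nil_eq_flatten, h1]
    by_cases hc : P.2 = []
    · simp [hc]
    · simp only [ne_eq, hc, not_false_eq_true, if_true, List.map_append, List.map_cons,
        List.map_nil, PySem.Str.toList_join, cpJoin_append_singleton, List.map_eq_nil_iff,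
        show ("\n".toList) = ['\n'] from rfl]
      simp
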